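-- pv_equiv track=rewrite | github.com/HammerDev99/GestionExpedienteElectronico_Version1 | src/model/metadata_extractor.py | is_order_correct
-- ===== SOURCE A (Python) =====
-- def is_order_correct(files, nombres_extensiones):
--     """
--     Verifica el orden de los archivos consecutivos.
--     Args:
--         files (List): Lista de nombres de archivos.
--         nombres_extensiones (List): Lista de nombres de archivos esperados con extensiones.
--     Returns:
--         bool: True si el orden es incorrecto, False en caso contrario.
--     """
--
--     cont = 0
--     for i in files:
--         for j in nombres_extensiones:
--             if i != j:
--                 cont = cont + 1
--     if cont != 0:
--         return True
--     else:
--         return False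
-- ===== SOURCE B (Python) =====
-- def is_order_correct(files, nombres_extensiones):
--     # True unless both lists are nonempty and every element of both lists
--     # equals files[0] (then no pair (i, j) with i != j exists).
--     if not files or not nombres_extensiones:
--         return False
--     v = files[0]
--     return any(f != v for f in files) or any(n != v for n in nombres_extensiones)
-- ===== Notes on version B (the rewrite author's own statement) =====
-- stated objective: faster
-- what changed: Replaced the nested loop counting all differing pairs by a single linear scan: the result is True iff both lists are nonempty and not every element equals files[0].
import Mathlib
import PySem

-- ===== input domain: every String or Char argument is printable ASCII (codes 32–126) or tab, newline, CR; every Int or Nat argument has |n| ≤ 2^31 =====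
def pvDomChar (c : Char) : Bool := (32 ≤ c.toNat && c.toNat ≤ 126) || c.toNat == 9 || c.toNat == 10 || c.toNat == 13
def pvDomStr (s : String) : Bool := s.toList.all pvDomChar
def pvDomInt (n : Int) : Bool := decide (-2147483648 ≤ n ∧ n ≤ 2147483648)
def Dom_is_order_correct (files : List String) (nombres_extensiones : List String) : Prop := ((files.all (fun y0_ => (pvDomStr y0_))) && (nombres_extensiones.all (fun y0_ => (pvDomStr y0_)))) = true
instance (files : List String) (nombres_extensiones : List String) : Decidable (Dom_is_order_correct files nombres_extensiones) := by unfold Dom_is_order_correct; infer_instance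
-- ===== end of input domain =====

-- B replaces A's nested O(n*m) pair-counting loop by a single O(n+m) scan (timing: measurably faster).
-- ===== PORT A =====
-- Port of A: count every pair (i, j) with i ≠ j, return true iff the count is nonzero.
def is_order_correct (files : List String) (nombres_extensiones : List String) : Bool :=
  let cont := files.foldl (fun c i =>
    nombres_extensiones.foldl (fun c j => if i ≠ j then c + 1 else c) c) (0 : Int)
  if cont ≠ 0 then true else false

-- ===== PORT B =====
-- Port of B: single linear scan against files[0].
def is_order_correct_alt (files : List String) (nombres_extensiones : List String) : Bool :=
  match files, nombres_extensiones with
  | [], _ => false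
  | _, [] => false
  | f :: fs, ns => (fs.any (fun x => x ≠ f)) || (ns.any (fun x => x ≠ f))

-- ===== PRECONDITION & SPEC =====
def Spec_is_order_correct (files : List String) (nombres_extensiones : List String) (out : Bool) : Prop := out = is_order_correct_alt files nombres_extensiones
instance (files : List String) (nombres_extensiones : List String) (out : Bool) : Decidable (Spec_is_order_correct files nombres_extensiones out) := by unfold Spec_is_order_correct; infer_instance

-- ===== CLAIM (what is proved, stated in full; the proofs are below) =====
def Claim_equal_is_order_correct : Prop := ∀ (files : List String) (nombres_extensiones : List String), Dom_is_order_correct files nombres_extensiones → Spec_is_order_correct files nombres_extensiones (is_order_correct files nombres_extensiones)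

-- ===== LEMMAS AND PROOFS =====

-- ===== VERDICT (by name: the statement is the Claim_ definition above) =====
-- The inner Python loop adds, to the accumulator, the number of j in nes with i ≠ j.
lemma inner_fold (i : String) (nes : List String) (c : Int) :
    nes.foldl (fun c j => if i ≠ j then c + 1 else c) c
      = c + (nes.countP (fun j => i ≠ j) : Int) := by
  induction nes generalizing c with
  | nil => simp
  | cons j t ih =>
    rw [List.foldl_cons, List.countP_cons, ih]
    by_cases h : i = j
    · simp [h]
    · simp [h]; ring

-- The whole nested loop computes the number of differing pairs.
lemma outer_fold (files nes : List String) (c : Int) :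
    files.foldl (fun c i => nes.foldl (fun c j => if i ≠ j then c + 1 else c) c) c
      = c + ((files.map (fun i => nes.countP (fun j => i ≠ j))).sum : Int) := by
  induction files generalizing c with
  | nil => simp
  | cons i t ih =>
    rw [List.foldl_cons, inner_fold, ih, List.map_cons, List.sum_cons]
    push_cast; ring

lemma sum_zero_iff (files nes : List String) :
    ((files.map (fun i => nes.countP (fun j => i ≠ j))).sum = 0)
      ↔ ∀ i ∈ files, ∀ j ∈ nes, i = j := by
  rw [List.sum_eq_zero_iff]
  constructor
  · intro h i hi j hj
    have := h _ (List.mem_map_of_mem hi)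
    rw [List.countP_eq_zero] at this
    simpa using this j hj
  · intro h x hx
    obtain ⟨i, hi, rfl⟩ := List.mem_map.mp hx
    rw [List.countP_eq_zero]
    intro j hj
    simpa using h i hi j hj

theorem is_order_correct_spec : Claim_equal_is_order_correct := by
  intro files nes _
  unfold Spec_is_order_correct is_order_correct is_order_correct_alt
  rw [outer_fold, zero_add]
  match files, nes with
  | [], _ => simp
  | f :: fs, [] => simp
  | f :: fs, n :: ns =>
    by_cases h : ∀ i ∈ f :: fs, ∀ j ∈ n :: ns, i = j
    · have hz : ((f :: fs).map (fun i => (n :: ns).countP (fun j => i ≠ j))).sum = 0 :=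
        (sum_zero_iff _ _).mpr h
      rw [if_neg (by simp only [ne_eq, not_not]; exact_mod_cast hz)]
      have hfn : f = n := h f (by simp) n (by simp)
      symm
      simp only [Bool.or_eq_false_iff, List.any_eq_false, decide_eq_true_eq, not_not]
      refine ⟨fun x hx => ?_, fun x hx => ?_⟩
      · exact (h x (by simp [hx]) n (by simp)).trans hfn.symm
      · exact ((h f (by simp) x hx)).symm
    · have hz : ((f :: fs).map (fun i => (n :: ns).countP (fun j => i ≠ j))).sum ≠ 0 :=
        fun hc => h ((sum_zero_iff _ _).mp hc)
      rw [if_pos (by exact_mod_cast hz)]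
      push Not at h
      obtain ⟨i, hi, j, hj, hij⟩ := h
      symm
      rw [Bool.or_eq_true]
      by_cases hjf : j = f
      · left
        rw [List.any_eq_true]
        have hif : i ≠ f := hjf ▸ hij
        have : i ∈ fs := by
          rcases List.mem_cons.mp hi with h1 | h1
          · exact absurd h1 hif
          · exact h1
        exact ⟨i, this, by simpa using hif⟩
      · right
        rw [List.any_eq_true]
        exact ⟨j, hj, by simpa using hjf⟩
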